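-- pv_equiv track=rewrite | github.com/SonofLastPanda/USZ-CDX | TGCA_cdx.py | takeString
-- ===== SOURCE A (Python) =====
-- def takeString(word):
--     fil_word=""
--     for a in word:
--         if(a!=" "):
--             fil_word=fil_word+a
--         else:
--             break
--     return fil_word
-- ===== SOURCE B (Python) =====
-- def takeString(word):
--     idx = word.find(" ")
--     if idx == -1:
--         return word
--     return word[:idx]
-- ===== Notes on version B (the rewrite author's own statement) =====
-- stated objective: simpler
-- what changed: Replaces the character-by-character accumulate-until-space loop with a two-phase find-then-slice: locate the first space once, then return the whole string or the prefix slice before it.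
import Mathlib
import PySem

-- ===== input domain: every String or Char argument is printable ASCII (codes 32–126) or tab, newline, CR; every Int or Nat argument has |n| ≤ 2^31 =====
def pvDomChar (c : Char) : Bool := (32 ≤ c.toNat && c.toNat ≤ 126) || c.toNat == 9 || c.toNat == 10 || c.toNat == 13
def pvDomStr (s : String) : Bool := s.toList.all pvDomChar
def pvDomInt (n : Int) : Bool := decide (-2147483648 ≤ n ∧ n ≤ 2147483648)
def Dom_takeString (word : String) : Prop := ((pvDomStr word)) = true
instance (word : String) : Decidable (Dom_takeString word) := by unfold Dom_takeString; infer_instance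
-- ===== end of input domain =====

-- B replaces A's accumulate-until-space loop with find-then-slice (simpler decomposition).

-- ===== PORT A =====
-- the for-loop with break: scan chars, append each non-space to the accumulator, stop at the first space
def takeStringGo (chars : List Char) (fil_word : String) : String :=
  match chars with
  | [] => fil_word
  | a :: rest => if a ≠ ' ' then takeStringGo rest (fil_word ++ String.singleton a) else fil_word

def takeString (word : String) : String :=
  takeStringGo word.toList ""

-- ===== PORT B =====
def takeString_alt (word : String) : String :=
  let idx := PySem.Str.find word " "
  if idx = -1 then word else PySem.Str.slice word none (some idx)

-- ===== PRECONDITION & SPEC =====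
def Spec_takeString (word : String) (out : String) : Prop := out = takeString_alt word
instance (word : String) (out : String) : Decidable (Spec_takeString word out) := by unfold Spec_takeString; infer_instance

-- ===== CLAIM (what is proved, stated in full; the proofs are below) =====
def Claim_equal_takeString : Prop := ∀ (word : String), Dom_takeString word → Spec_takeString word (takeString word)

-- ===== LEMMAS AND PROOFS =====

-- A's loop builds acc ++ takeWhile (· ≠ ' ')
theorem takeStringGo_eq (l : List Char) (acc : String) :
    takeStringGo l acc = acc ++ String.ofList (l.takeWhile (· ≠ ' ')) := by
  induction l generalizing acc with
  | nil => simp [takeStringGo]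
  | cons a rest ih =>
    by_cases h : a = ' '
    · subst h
      simp [takeStringGo, List.takeWhile]
    · rw [takeStringGo, if_pos h, ih, List.takeWhile_cons_of_pos (by simp [h])]
      rw [show String.ofList (a :: rest.takeWhile (· ≠ ' ')) =
            String.singleton a ++ String.ofList (rest.takeWhile (· ≠ ' ')) from by
          simp [String.singleton_eq_ofList, ← String.ofList_append]]
      rw [String.append_assoc]

-- the single-character search: find.go [' '] l k = k + first space index, via takeWhile
theorem findGo_space (l : List Char) (k : Nat) :
    PySem.Chars.find.go [' '] l k =
      if ' ' ∈ l then ((k : Int) + (l.takeWhile (· ≠ ' ')).length) else -1 := by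
  induction l generalizing k with
  | nil => simp [PySem.Chars.find.go]
  | cons a rest ih =>
    by_cases h : a = ' '
    · subst h
      simp [PySem.Chars.find.go, List.isPrefixOf, List.takeWhile]
    · rw [PySem.Chars.find.go]
      have hpre : List.isPrefixOf [' '] (a :: rest) = false := by
        simp [List.isPrefixOf]
        exact fun hh => absurd hh.symm h
      rw [hpre]
      simp only [Bool.false_eq_true, if_false, ih]
      by_cases hm : ' ' ∈ rest
      · rw [if_pos hm, if_pos (List.mem_cons_of_mem a hm)]
        simp [List.takeWhile, h]
        push_cast
        ring
      · have hm2 : ' ' ∉ a :: rest := by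
          simp [hm]
          exact fun hh => h hh.symm
        rw [if_neg hm, if_neg hm2]

theorem takeString_alt_eq (word : String) :
    takeString_alt word = String.ofList (word.toList.takeWhile (· ≠ ' ')) := by
  unfold takeString_alt
  rw [PySem.Str.find_eq]
  have hs : (" " : String).toList = [' '] := rfl
  rw [hs]
  have : PySem.Chars.find word.toList [' '] = PySem.Chars.find.go [' '] word.toList 0 := rfl
  rw [this, findGo_space]
  simp only [Nat.cast_zero, zero_add]
  by_cases hm : ' ' ∈ word.toList
  · simp only [hm, if_true]
    set n := (word.toList.takeWhile (· ≠ ' ')).length with hn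
    have hne : ((n : Int)) ≠ -1 := by omega
    rw [if_neg hne]
    unfold PySem.Str.slice PySem.Chars.slice
    rw [PySem.List.slice_to_natCast]
    congr 1
    have hpre : word.toList.takeWhile (· ≠ ' ') <+: word.toList := List.takeWhile_prefix _
    exact ((List.prefix_iff_eq_take.mp hpre)).symm
  · simp only [hm, if_false, if_true]
    have : word.toList.takeWhile (· ≠ ' ') = word.toList := by
      apply List.takeWhile_eq_self_iff.mpr
      intro x hx
      simp
      exact fun hc => hm (hc ▸ hx)
    rw [this]
    exact (String.ofList_toList (s := word)).symm

-- ===== VERDICT (by name: the statement is the Claim_ definition above) =====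
theorem takeString_spec : Claim_equal_takeString := by
  intro word _
  unfold Spec_takeString takeString
  rw [takeStringGo_eq, takeString_alt_eq]
  simp
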